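-- pv_equiv track=rewrite | github.com/john35452/GFG_Weekly_Coding_Contest | gfg-weekly-coding-contest-107/Gathering Boulders.py | gatheringCost
-- ===== SOURCE A (Python) =====
-- from typing import List
--
-- def gatheringCost(N : int, weightsArr : List[int]) -> int:
--     # code here
--     prefix = [0]*(N + 1)
--     current = 0
--     for i in range(N):
--         prefix[i + 1] = prefix[i] + weightsArr[i]
--         current += i * (weightsArr[i])
--
--     ans = current
--     for i in range(N):
--         current += prefix[i + 1]
--         current -= prefix[N] - prefix[i + 1]
--         ans = min(ans, current)
--     return ans
-- ===== SOURCE B (Python) =====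
-- from typing import List
--
-- def gatheringCost(N: int, weightsArr: List[int]) -> int:
--     # Prefix tables of weights and index-weighted sums, then an O(1)
--     # closed-form cost per pivot; minimum taken over all pivots 0..N.
--     M = max(N, 0)
--     pw, piw = [0], [0]
--     for i in range(M):
--         pw.append(pw[-1] + weightsArr[i])
--         piw.append(piw[-1] + i * weightsArr[i])
--     return min(
--         (p * pw[p] - piw[p]) + ((piw[M] - piw[p]) - p * (pw[M] - pw[p]))
--         for p in range(M + 1)
--     )
-- ===== Notes on version B (the rewrite author's own statement) =====
-- stated objective: alternative
-- what changed: A sweeps the pivot left-to-right updating a running cost incrementally from the previous pivot; B instead builds prefix tables of weights and index-weighted weights and evaluates each pivot's cost independently by an O(1) closed-form expression, taking the minimum over all pivots.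
import Mathlib
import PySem

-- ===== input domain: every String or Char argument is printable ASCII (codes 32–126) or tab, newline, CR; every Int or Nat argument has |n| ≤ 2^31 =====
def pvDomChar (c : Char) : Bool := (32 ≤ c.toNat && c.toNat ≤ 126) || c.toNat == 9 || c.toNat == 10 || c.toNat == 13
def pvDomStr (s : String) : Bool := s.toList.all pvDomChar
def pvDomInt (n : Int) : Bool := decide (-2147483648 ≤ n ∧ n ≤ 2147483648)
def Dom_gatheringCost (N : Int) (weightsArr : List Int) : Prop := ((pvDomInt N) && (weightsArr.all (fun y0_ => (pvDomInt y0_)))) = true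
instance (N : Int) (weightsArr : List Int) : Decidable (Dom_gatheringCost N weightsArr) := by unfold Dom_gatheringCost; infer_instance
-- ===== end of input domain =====

-- B replaces A's incremental pivot sweep by prefix tables (weights and index-weighted
-- weights) with an O(1) closed-form cost per pivot, minimised over all pivots: a
-- different decomposition of the same O(N) computation (objective: alternative).

-- ===== PORT A =====
def gatheringCost (N : Int) (weightsArr : List Int) : Int :=
  -- prefix = [0]*(N+1); current = 0; first loop fills prefix and current
  let st1 := (PySem.List.pyRange 0 N 1).foldl
    (fun (st : List Int × Int) i =>
      (PySem.List.pySetD st.1 (i + 1) (PySem.List.pyGetD st.1 i 0 + PySem.List.pyGetD weightsArr i 0),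
       st.2 + i * PySem.List.pyGetD weightsArr i 0))
    (List.replicate (N + 1).toNat 0, 0)
  -- ans = current; second loop sweeps the pivot, state = (ans, current)
  let st2 := (PySem.List.pyRange 0 N 1).foldl
    (fun (st : Int × Int) i =>
      let c := st.2 + PySem.List.pyGetD st1.1 (i + 1) 0
        - (PySem.List.pyGetD st1.1 N 0 - PySem.List.pyGetD st1.1 (i + 1) 0)
      (min st.1 c, c))
    (st1.2, st1.2)
  st2.1

-- ===== PORT B =====
def gatheringCost_alt (N : Int) (weightsArr : List Int) : Int :=
  let M := max N 0
  -- pw, piw = [0], [0]; grown by append, reading the running last entry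
  let st := (PySem.List.pyRange 0 M 1).foldl
    (fun (st : List Int × List Int) i =>
      (st.1 ++ [PySem.List.pyGetD st.1 (-1) 0 + PySem.List.pyGetD weightsArr i 0],
       st.2 ++ [PySem.List.pyGetD st.2 (-1) 0 + i * PySem.List.pyGetD weightsArr i 0]))
    ([0], [0])
  -- min over pivots of the O(1) closed-form cost
  let costs := (PySem.List.pyRange 0 (M + 1) 1).map (fun p =>
    (p * PySem.List.pyGetD st.1 p 0 - PySem.List.pyGetD st.2 p 0)
      + ((PySem.List.pyGetD st.2 M 0 - PySem.List.pyGetD st.2 p 0)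
         - p * (PySem.List.pyGetD st.1 M 0 - PySem.List.pyGetD st.1 p 0)))
  (PySem.List.min? costs (fun x => x)).getD 0

-- ===== PRECONDITION & SPEC =====
-- Pre_ excludes exactly N > len(weightsArr), where Python A raises IndexError
-- (first loop reads weightsArr[i] for i up to N-1); Python B raises there too.
def Pre_gatheringCost (N : Int) (weightsArr : List Int) : Prop :=
  N ≤ (weightsArr.length : Int)
instance (N : Int) (weightsArr : List Int) : Decidable (Pre_gatheringCost N weightsArr) := by unfold Pre_gatheringCost; infer_instance

def pvWitness_gatheringCost : Int × List Int := (3, [2, -1, 4])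

def Spec_gatheringCost (N : Int) (weightsArr : List Int) (out : Int) : Prop := out = gatheringCost_alt N weightsArr
instance (N : Int) (weightsArr : List Int) (out : Int) : Decidable (Spec_gatheringCost N weightsArr out) := by unfold Spec_gatheringCost; infer_instance

-- ===== CLAIM (what is proved, stated in full; the proofs are below) =====
def Claim_equal_gatheringCost : Prop := ∀ (N : Int) (weightsArr : List Int), Dom_gatheringCost N weightsArr → Pre_gatheringCost N weightsArr → Spec_gatheringCost N weightsArr (gatheringCost N weightsArr)

-- ===== LEMMAS AND PROOFS =====

-- prefix sum of the first k weights
def pwF (w : List Int) : Nat → Int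
  | 0 => 0
  | k + 1 => pwF w k + w.getD k 0

-- prefix sum of i * w_i over the first k weights
def piwF (w : List Int) : Nat → Int
  | 0 => 0
  | k + 1 => piwF w k + (k : Int) * w.getD k 0

-- gathering cost at pivot p with n boulders
def costF (w : List Int) (n p : Nat) : Int :=
  ((p : Int) * pwF w p - piwF w p)
    + ((piwF w n - piwF w p) - (p : Int) * (pwF w n - pwF w p))

-- running minimum of costs over pivots 0..j
def minAns (w : List Int) (n j : Nat) : Int :=
  ((List.range j).map (fun i => costF w n (i + 1))).foldl min (costF w n 0)

theorem costF_zero (w : List Int) (n : Nat) : costF w n 0 = piwF w n := by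
  simp [costF, pwF, piwF]

theorem costF_succ (w : List Int) (n j : Nat) :
    costF w n (j + 1)
      = costF w n j + pwF w (j + 1) - (pwF w n - pwF w (j + 1)) := by
  simp only [costF, pwF, piwF]
  push_cast
  ring

theorem mapF_succ {α : Type} (f : Nat → α) (j : Nat) :
    (List.range (j + 1)).map f = (List.range j).map f ++ [f j] := by
  rw [List.range_succ, List.map_append]; rfl

theorem getD_map_range_lt (f : Nat → Int) (m k : Nat) (hk : k < m) :
    ((List.range m).map f).getD k 0 = f k := by
  simp [List.getD_eq_getElem?_getD, hk]

theorem minAns_succ (w : List Int) (n j : Nat) :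
    minAns w n (j + 1) = min (minAns w n j) (costF w n (j + 1)) := by
  rw [minAns, minAns, mapF_succ (fun i => costF w n (i + 1)) j, List.foldl_append]
  simp only [List.foldl_cons, List.foldl_nil]

-- the prefix array after j iterations of A's first loop
def Pj (w : List Int) (n j : Nat) : List Int :=
  (List.range (n + 1)).map (fun k => if k ≤ j then pwF w k else 0)

theorem Pj_zero (w : List Int) (n : Nat) :
    Pj w n 0 = List.replicate (n + 1) 0 := by
  apply List.ext_getElem
  · simp [Pj]
  · intro k h1 h2
    simp only [Pj, List.getElem_map, List.getElem_range, List.getElem_replicate]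
    split_ifs with h
    · have : k = 0 := by omega
      subst this; rfl
    · rfl

theorem Pj_getD (w : List Int) (n j k : Nat) (hk : k ≤ n) (hkj : k ≤ j) :
    (Pj w n j).getD k 0 = pwF w k := by
  have hlt : k < n + 1 := by omega
  simp [Pj, List.getD_eq_getElem?_getD, hlt, hkj]

theorem Pj_set (w : List Int) (n j : Nat) (hj : j < n) :
    (Pj w n j).set (j + 1) (pwF w (j + 1)) = Pj w n (j + 1) := by
  apply List.ext_getElem
  · simp [Pj]
  · intro k hk1 hk2
    simp only [Pj] at hk1
    simp only [List.getElem_set, Pj, List.getElem_map, List.getElem_range]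
    split_ifs with h1 h2 h3 h3 <;> first | rfl | omega | (subst h1; omega)

theorem Pj_final (w : List Int) (n : Nat) :
    Pj w n n = (List.range (n + 1)).map (pwF w) := by
  apply List.map_congr_left
  intro k hk
  simp only [List.mem_range] at hk
  simp [show k ≤ n by omega]

-- A's first loop, after its first j iterations
theorem loopA1 (w : List Int) (n : Nat) (j : Nat) (hj : j ≤ n) :
    ((List.range j).map (fun k : Nat => (k : Int))).foldl
      (fun (st : List Int × Int) i =>
        (PySem.List.pySetD st.1 (i + 1) (PySem.List.pyGetD st.1 i 0 + PySem.List.pyGetD w i 0),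
         st.2 + i * PySem.List.pyGetD w i 0))
      (List.replicate (n + 1) 0, 0)
    = (Pj w n j, piwF w j) := by
  induction j with
  | zero => simp [Pj_zero, piwF]
  | succ j ih =>
    have hj' : j ≤ n := by omega
    rw [mapF_succ, List.foldl_append, ih hj']
    simp only [List.foldl_cons, List.foldl_nil]
    have h1 : ((j : Int) + 1) = ((j + 1 : Nat) : Int) := by push_cast; ring
    rw [h1]
    simp only [PySem.List.pySetD_natCast, PySem.List.pyGetD_natCast]
    rw [Pj_getD w n j j hj' le_rfl]
    simp only [Prod.mk.injEq]
    refine ⟨?_, ?_⟩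
    · rw [show pwF w j + w.getD j 0 = pwF w (j + 1) from rfl,
        Pj_set w n j (by omega)]
    · rfl

-- A's second loop, after its first j iterations
theorem loopA2 (w : List Int) (n : Nat) (Ni : Int) (hNi : Ni = (n : Int)) (j : Nat) (hj : j ≤ n) :
    ((List.range j).map (fun k : Nat => (k : Int))).foldl
      (fun (st : Int × Int) i =>
        let c := st.2 + PySem.List.pyGetD ((List.range (n + 1)).map (pwF w)) (i + 1) 0
          - (PySem.List.pyGetD ((List.range (n + 1)).map (pwF w)) Ni 0
             - PySem.List.pyGetD ((List.range (n + 1)).map (pwF w)) (i + 1) 0)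
        (min st.1 c, c))
      (piwF w n, piwF w n)
    = (minAns w n j, costF w n j) := by
  subst hNi
  induction j with
  | zero => simp [minAns, costF_zero]
  | succ j ih =>
    have hj' : j ≤ n := by omega
    rw [mapF_succ (fun k : Nat => (k : Int)) j, List.foldl_append, ih hj']
    simp only [List.foldl_cons, List.foldl_nil]
    have h1 : ((j : Int) + 1) = ((j + 1 : Nat) : Int) := by push_cast; ring
    rw [h1]
    simp only [PySem.List.pyGetD_natCast]
    rw [getD_map_range_lt (pwF w) (n + 1) (j + 1) (by omega),
      getD_map_range_lt (pwF w) (n + 1) n (by omega)]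
    simp only [Prod.mk.injEq]
    refine ⟨?_, ?_⟩
    · rw [minAns_succ, costF_succ]
    · rw [costF_succ]

-- B's prefix-building loop, after its first j iterations
theorem loopB (w : List Int) (j : Nat) :
    ((List.range j).map (fun k : Nat => (k : Int))).foldl
      (fun (st : List Int × List Int) i =>
        (st.1 ++ [PySem.List.pyGetD st.1 (-1) 0 + PySem.List.pyGetD w i 0],
         st.2 ++ [PySem.List.pyGetD st.2 (-1) 0 + i * PySem.List.pyGetD w i 0]))
      ([0], [0])
    = ((List.range (j + 1)).map (pwF w), (List.range (j + 1)).map (piwF w)) := by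
  induction j with
  | zero => simp [pwF, piwF]
  | succ j ih =>
    rw [mapF_succ (fun k : Nat => (k : Int)) j, List.foldl_append, ih]
    simp only [List.foldl_cons, List.foldl_nil]
    rw [mapF_succ (pwF w) j, mapF_succ (piwF w) j]
    simp only [PySem.List.pyGetD_neg_one_append_singleton, PySem.List.pyGetD_natCast]
    rw [← mapF_succ (pwF w) j, ← mapF_succ (piwF w) j]
    simp only [Prod.mk.injEq]
    refine ⟨?_, ?_⟩
    · rw [mapF_succ (pwF w) (j + 1)]; rfl
    · rw [mapF_succ (piwF w) (j + 1)]; rfl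

theorem pyRange_nat (b : Nat) :
    PySem.List.pyRange 0 (b : Int) 1 = (List.range b).map (fun k : Nat => (k : Int)) := by
  rw [PySem.List.pyRange_one]
  simp

set_option maxRecDepth 4096 in
theorem A_eq_minAns (N : Int) (w : List Int) :
    gatheringCost N w = minAns w N.toNat N.toNat := by
  have hr : PySem.List.pyRange 0 N 1
      = (List.range N.toNat).map (fun k : Nat => (k : Int)) := by
    by_cases h : 0 ≤ N
    · conv_lhs => rw [← Int.toNat_of_nonneg h]
      rw [pyRange_nat]
    · rw [PySem.List.pyRange_one_eq_nil (by omega)]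
      rw [Int.toNat_of_nonpos (by omega)]
      rfl
  by_cases hN : 0 ≤ N
  · have hrep : (N + 1).toNat = N.toNat + 1 := by omega
    have hNc : (N.toNat : Int) = N := Int.toNat_of_nonneg hN
    simp only [gatheringCost, hr, hrep]
    rw [loopA1 w N.toNat N.toNat le_rfl]
    simp only [Pj_final]
    rw [loopA2 w N.toNat N hNc.symm N.toNat le_rfl]
  · have h0 : N.toNat = 0 := Int.toNat_of_nonpos (by omega)
    simp only [gatheringCost, hr, h0]
    simp [minAns, costF_zero, piwF]

theorem B_eq_minAns (N : Int) (w : List Int) :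
    gatheringCost_alt N w = minAns w N.toNat N.toNat := by
  have hM : max N 0 = (N.toNat : Int) := (Int.toNat_eq_max N).symm
  have hM1 : (N.toNat : Int) + 1 = ((N.toNat + 1 : Nat) : Int) := by push_cast; ring
  simp only [gatheringCost_alt, hM, hM1, pyRange_nat]
  rw [loopB w N.toNat]
  set n := N.toNat with hn
  rw [List.map_map]
  have hcosts : ((List.range (n + 1)).map
      ((fun p : Int => (p * PySem.List.pyGetD ((List.range (n + 1)).map (pwF w)) p 0
            - PySem.List.pyGetD ((List.range (n + 1)).map (piwF w)) p 0)
          + ((PySem.List.pyGetD ((List.range (n + 1)).map (piwF w)) (n : Int) 0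
              - PySem.List.pyGetD ((List.range (n + 1)).map (piwF w)) p 0)
             - p * (PySem.List.pyGetD ((List.range (n + 1)).map (pwF w)) (n : Int) 0
                - PySem.List.pyGetD ((List.range (n + 1)).map (pwF w)) p 0)))
        ∘ (fun k : Nat => (k : Int))))
      = (List.range (n + 1)).map (costF w n) := by
    apply List.map_congr_left
    intro k hk
    simp only [List.mem_range] at hk
    simp only [Function.comp_apply, PySem.List.pyGetD_natCast]
    rw [getD_map_range_lt (pwF w) (n + 1) k hk,
      getD_map_range_lt (piwF w) (n + 1) k hk,
      getD_map_range_lt (pwF w) (n + 1) n (by omega),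
      getD_map_range_lt (piwF w) (n + 1) n (by omega)]
    rfl
  rw [hcosts]
  rw [show List.range (n + 1) = 0 :: (List.range n).map Nat.succ from List.range_succ_eq_map]
  simp only [List.map_cons, List.map_map]
  rw [PySem.List.min?_id_cons]
  simp only [Option.getD_some]
  rfl

-- ===== VERDICT (by name: the statement is the Claim_ definition above) =====
theorem gatheringCost_spec : Claim_equal_gatheringCost := by
  intro N w _ _
  unfold Spec_gatheringCost
  rw [A_eq_minAns, B_eq_minAns]
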